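-- pv_equiv track=rewrite | github.com/soshishimada/Neural_Physcap_Demo | Utils/openpose_util.py | find_start_end_of_errors
-- ===== SOURCE A (Python) =====
-- def find_start_end_of_errors(j_line):
--     zero_in_flag = 0
--     all_pairs = []
--     for j in range(len(j_line)):
--         if j_line[j] == 0:
--             if not zero_in_flag:
--                 start_index = j - 1
--             zero_in_flag = 1
--
--         if j_line[j] != 0 and zero_in_flag:
--             zero_in_flag = 0
--             end_index = j
--             all_pairs.append((start_index, end_index))
--     return all_pairs
-- ===== SOURCE B (Python) =====
-- def find_start_end_of_errors(j_line):
--     # Run-based scan: split j_line into maximal runs of equal zero-ness;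
--     # each zero-run that is followed by something yields (run_start-1, run_end).
--     pairs = []
--     i, n = 0, len(j_line)
--     while i < n:
--         j = i + 1
--         while j < n and (j_line[j] == 0) == (j_line[i] == 0):
--             j += 1
--         if j_line[i] == 0 and j < n:
--             pairs.append((i - 1, j))
--         i = j
--     return pairs
-- ===== Notes on version B (the rewrite author's own statement) =====
-- stated objective: alternative
-- what changed: B replaces A's element-by-element scan with an in-flag state machine by a run-splitting scan: it jumps over each maximal run of equal zero-ness at once and emits one pair per zero-run that is followed by further elements.
import Mathlib
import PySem

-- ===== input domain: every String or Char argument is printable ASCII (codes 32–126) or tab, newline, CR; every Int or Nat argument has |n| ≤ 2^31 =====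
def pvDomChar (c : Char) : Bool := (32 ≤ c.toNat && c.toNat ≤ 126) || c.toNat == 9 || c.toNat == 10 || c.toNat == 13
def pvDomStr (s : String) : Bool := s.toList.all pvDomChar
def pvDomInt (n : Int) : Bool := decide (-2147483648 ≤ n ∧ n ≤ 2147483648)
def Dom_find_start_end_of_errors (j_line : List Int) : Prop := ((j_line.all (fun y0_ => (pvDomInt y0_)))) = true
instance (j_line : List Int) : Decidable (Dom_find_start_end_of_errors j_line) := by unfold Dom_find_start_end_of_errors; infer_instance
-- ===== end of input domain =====

-- One honest line: B scans run-by-run (jumping over each maximal run of equal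
-- zero-ness) instead of A's element-by-element flag state machine; alternative
-- decomposition, same O(n) cost.

-- ===== PORT A =====
-- A's loop `for j in range(len(j_line))` indexing j_line[j] is ported as a fold
-- over the (value, index) pairs; state = (zero_in_flag, start_index, all_pairs).
def find_start_end_of_errors (j_line : List Int) : List (Int × Int) :=
  (j_line.zipIdx.foldl
    (fun (s : Int × Int × List (Int × Int)) (xj : Int × Nat) =>
      let s1 := if xj.1 = 0 then
          ((1 : Int), (if s.1 = 0 then (xj.2 : Int) - 1 else s.2.1), s.2.2)
        else s
      if xj.1 ≠ 0 ∧ s1.1 ≠ 0 then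
        ((0 : Int), s1.2.1, s1.2.2 ++ [(s1.2.1, (xj.2 : Int))])
      else s1)
    ((0 : Int), (0 : Int), ([] : List (Int × Int)))).2.2

-- ===== PORT B =====
-- inner while loop of Source B = takeWhile/dropWhile of the "same zero-ness" run
def altGo (pos : Int) : List Int → List (Int × Int)
  | [] => []
  | x :: xs =>
    let p : Int → Bool := fun y => decide (y = 0) == decide (x = 0)
    let run := xs.takeWhile p
    let rest := xs.dropWhile p
    let len : Int := 1 + run.length
    if x = 0 ∧ rest ≠ [] then (pos - 1, pos + len) :: altGo (pos + len) rest
    else altGo (pos + len) rest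
termination_by l => l.length
decreasing_by all_goals
  simp only [List.length_cons]
  exact Nat.lt_succ_of_le (List.length_dropWhile_le _ _)

def find_start_end_of_errors_alt (j_line : List Int) : List (Int × Int) :=
  altGo 0 j_line

-- ===== PRECONDITION & SPEC =====
def Spec_find_start_end_of_errors (j_line : List Int) (out : List (Int × Int)) : Prop := out = find_start_end_of_errors_alt j_line
instance (j_line : List Int) (out : List (Int × Int)) : Decidable (Spec_find_start_end_of_errors j_line out) := by unfold Spec_find_start_end_of_errors; infer_instance

-- ===== CLAIM (what is proved, stated in full; the proofs are below) =====
def Claim_equal_find_start_end_of_errors : Prop := ∀ (j_line : List Int), Dom_find_start_end_of_errors j_line → Spec_find_start_end_of_errors j_line (find_start_end_of_errors j_line)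

-- ===== LEMMAS AND PROOFS =====

-- A's loop, written as structural recursion on the remaining suffix.
def aLoop (flag start : Int) (pos : Nat) : List Int → List (Int × Int)
  | [] => []
  | x :: xs =>
    if x = 0 then
      aLoop 1 (if flag = 0 then (pos : Int) - 1 else start) (pos + 1) xs
    else if flag ≠ 0 then (start, (pos : Int)) :: aLoop 0 start (pos + 1) xs
    else aLoop flag start (pos + 1) xs

theorem foldl_eq_aLoop (l : List Int) : ∀ (flag start : Int) (pos : Nat)
    (acc : List (Int × Int)),
    ((l.zipIdx pos).foldl
      (fun (s : Int × Int × List (Int × Int)) (xj : Int × Nat) =>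
        let s1 := if xj.1 = 0 then
            ((1 : Int), (if s.1 = 0 then (xj.2 : Int) - 1 else s.2.1), s.2.2)
          else s
        if xj.1 ≠ 0 ∧ s1.1 ≠ 0 then
          ((0 : Int), s1.2.1, s1.2.2 ++ [(s1.2.1, (xj.2 : Int))])
        else s1)
      (flag, start, acc)).2.2 = acc ++ aLoop flag start pos l := by
  induction l with
  | nil => intro flag start pos acc; simp [aLoop]
  | cons x xs ih =>
    intro flag start pos acc
    simp only [List.zipIdx_cons, List.foldl_cons, ih]
    by_cases hx : x = 0
    · by_cases hf : flag = 0 <;> simp [aLoop, hx, hf]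
    · by_cases hf : flag = 0 <;> simp [aLoop, hx, hf]

-- skipping a block of zeros with the flag set leaves aLoop unchanged
theorem aLoop_zeros (t : List Int) (ht : ∀ y ∈ t, y = 0) :
    ∀ (r : List Int) (s : Int) (pos : Nat),
    aLoop 1 s pos (t ++ r) = aLoop 1 s (pos + t.length) r := by
  induction t with
  | nil => intro r s pos; simp
  | cons y ys ih =>
    intro r s pos
    have hy : y = 0 := ht y (List.mem_cons_self ..)
    simp only [List.cons_append, aLoop, if_pos hy, if_neg (one_ne_zero (α := Int))]
    rw [ih (fun z hz => ht z (List.mem_cons_of_mem _ hz))]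
    congr 1
    simp [List.length_cons]; omega

-- skipping a block of nonzeros with the flag clear leaves aLoop unchanged
theorem aLoop_nonzeros (t : List Int) (ht : ∀ y ∈ t, y ≠ 0) :
    ∀ (r : List Int) (s : Int) (pos : Nat),
    aLoop 0 s pos (t ++ r) = aLoop 0 s (pos + t.length) r := by
  induction t with
  | nil => intro r s pos; simp
  | cons y ys ih =>
    intro r s pos
    have hy : y ≠ 0 := ht y (List.mem_cons_self ..)
    simp only [aLoop, List.cons_append, if_neg hy, ne_eq, not_true_eq_false]
    rw [if_neg (by simp)]
    rw [ih (fun z hz => ht z (List.mem_cons_of_mem _ hz))]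
    congr 1
    simp [List.length_cons]; omega

theorem head_dropWhile_false {α : Type} (p : α → Bool) :
    ∀ (xs : List α) {y : α} {ys : List α}, xs.dropWhile p = y :: ys → p y = false := by
  intro xs
  induction xs with
  | nil => intro y ys h; simp [List.dropWhile] at h
  | cons a as ih =>
    intro y ys h
    rw [List.dropWhile_cons] at h
    by_cases ha : p a = true
    · rw [if_pos ha] at h; exact ih h
    · rw [if_neg ha] at h
      cases h
      simpa using ha

-- unfolding equations, kept fine-grained to control the rewriting
theorem aLoop_cons_zero (flag start : Int) (pos : Nat) (x : Int) (xs : List Int)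
    (hx : x = 0) : aLoop flag start pos (x :: xs)
      = aLoop 1 (if flag = 0 then (pos : Int) - 1 else start) (pos + 1) xs := by
  simp [aLoop, hx]

theorem aLoop_cons_nz_flag (flag start : Int) (pos : Nat) (x : Int) (xs : List Int)
    (hx : x ≠ 0) (hf : flag ≠ 0) : aLoop flag start pos (x :: xs)
      = (start, (pos : Int)) :: aLoop 0 start (pos + 1) xs := by
  simp [aLoop, hx, hf]

theorem aLoop_cons_nz_noflag (start : Int) (pos : Nat) (x : Int) (xs : List Int)
    (hx : x ≠ 0) : aLoop 0 start pos (x :: xs) = aLoop 0 start (pos + 1) xs := by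
  simp [aLoop, hx]

theorem altGo_cons (pos : Int) (x : Int) (xs : List Int) :
    altGo pos (x :: xs)
      = (if x = 0 ∧ xs.dropWhile (fun y => decide (y = 0) == decide (x = 0)) ≠ [] then
          (pos - 1, pos + (1 + ((xs.takeWhile (fun y => decide (y = 0) == decide (x = 0))).length : Int)))
            :: altGo (pos + (1 + ((xs.takeWhile (fun y => decide (y = 0) == decide (x = 0))).length : Int)))
                 (xs.dropWhile (fun y => decide (y = 0) == decide (x = 0)))
        else altGo (pos + (1 + ((xs.takeWhile (fun y => decide (y = 0) == decide (x = 0))).length : Int)))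
               (xs.dropWhile (fun y => decide (y = 0) == decide (x = 0)))) := by
  rw [altGo]

theorem aLoop_eq_altGo (l : List Int) : ∀ (s : Int) (pos : Nat),
    aLoop 0 s pos l = altGo (pos : Int) l := by
  induction hn : l.length using Nat.strong_induction_on generalizing l with
  | _ n ih =>
  intro s pos
  cases l with
  | nil => simp [aLoop, altGo]
  | cons x xs =>
    subst hn
    have hsplit : xs = xs.takeWhile (fun y => decide (y = 0) == decide (x = 0))
        ++ xs.dropWhile (fun y => decide (y = 0) == decide (x = 0)) :=
      (List.takeWhile_append_dropWhile).symm
    have hlen : (xs.dropWhile (fun y => decide (y = 0) == decide (x = 0))).length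
        < (x :: xs).length := by
      simp only [List.length_cons]
      exact Nat.lt_succ_of_le (List.length_dropWhile_le _ _)
    have hih : ∀ (s' : Int) (pos' : Nat),
        aLoop 0 s' pos' (xs.dropWhile (fun y => decide (y = 0) == decide (x = 0)))
          = altGo (pos' : Int) (xs.dropWhile (fun y => decide (y = 0) == decide (x = 0))) :=
      ih _ hlen _ rfl
    have hcast : (pos : Int) + (1 + ((xs.takeWhile (fun y => decide (y = 0) == decide (x = 0))).length : Int))
        = ((pos + 1 + (xs.takeWhile (fun y => decide (y = 0) == decide (x = 0))).length : Nat) : Int) := by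
      push_cast; ring
    by_cases hx : x = 0
    · -- zero-run starting at pos
      have ht : ∀ y ∈ xs.takeWhile (fun y => decide (y = 0) == decide (x = 0)), y = 0 := by
        intro y hy
        have := List.mem_takeWhile_imp hy
        simp [hx] at this
        exact this
      rw [aLoop_cons_zero 0 s pos x xs hx, if_pos rfl]
      conv_lhs => rw [hsplit]
      rw [aLoop_zeros _ ht]
      rw [altGo_cons]
      rcases hrest : xs.dropWhile (fun y => decide (y = 0) == decide (x = 0)) with _ | ⟨y, ys⟩
      · rw [if_neg (by simp)]
        simp [aLoop, altGo]
      · have hy : y ≠ 0 := by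
          have := head_dropWhile_false _ xs hrest
          simp [hx] at this
          exact this
        rw [if_pos ⟨hx, by simp⟩]
        rw [aLoop_cons_nz_flag 1 _ _ y ys hy one_ne_zero]
        rw [hcast]
        congr 1
        have := hih ((pos : Int) - 1) (pos + 1 + (xs.takeWhile (fun y => decide (y = 0) == decide (x = 0))).length)
        rw [hrest] at this
        rw [← this]
        rw [aLoop_cons_nz_noflag _ _ y ys hy]
    · -- nonzero-run starting at pos
      have ht : ∀ y ∈ xs.takeWhile (fun y => decide (y = 0) == decide (x = 0)), y ≠ 0 := by
        intro y hy
        have := List.mem_takeWhile_imp hy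
        simp [hx] at this
        exact this
      rw [aLoop_cons_nz_noflag s pos x xs hx]
      conv_lhs => rw [hsplit]
      rw [aLoop_nonzeros _ ht]
      rw [altGo_cons, if_neg (by simp [hx]), hcast]
      exact hih s _

-- ===== VERDICT (by name: the statement is the Claim_ definition above) =====
theorem find_start_end_of_errors_spec : Claim_equal_find_start_end_of_errors := by
  intro j_line _
  unfold Spec_find_start_end_of_errors find_start_end_of_errors find_start_end_of_errors_alt
  rw [show j_line.zipIdx = j_line.zipIdx 0 from rfl]
  rw [foldl_eq_aLoop j_line 0 0 0 []]
  rw [List.nil_append]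
  exact aLoop_eq_altGo j_line 0 0
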